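-- pv_equiv track=rewrite | github.com/tdial676/school_projects | lab2c.py | compare_codes
-- ===== SOURCE A (Python) =====
-- def count_exact_matches(str1, str2):
--     """
--     This function takes two strings of length four each and returns an int
--     number of places where the two strings have the exact same letters at the exact same locations
--
--     Arguments: two string arguments
--     Return Values: an int representing the number of places where the two strings have the exact
--     same letters at the exact same locations
--     """
--     matches = 0
--     count = 0
--     for letter in str1:
--         if letter == str2[count]:
--             matches += 1
--         count += 1
--     return matches
--
-- def count_letter_matches(str1, str2):
--     """
--     This function takes in two string arguments and returns the number of charecters that
--     the two strings share.
--
--     Arguments: Two strings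
--     Return Value: int of the number of charecters the two str arguments share.
--     """
--     s1 = list(str1)
--     s2 = list(str2)
--     matches = 0
--     for letter in str1:
--         if letter in s2:
--             matches += 1
--             s2.remove(letter)
--     return matches
--
-- def compare_codes(code, guess):
--     """
--     This function takes in two string arguments and returns the amount of exact matches, matches, and
--     mismatches between the two string in the form of a string.
--
--     Arguments: two string arguments
--     Return Value: a string denoting the number of exact matches, matches, and mismatches between the two strings
--
--     """
--     result = ''
--     count_b = 0
--     count_w = 0
--     count_dash = 0
--     b = count_exact_matches(code, guess)
--     w = count_letter_matches(code, guess) - count_exact_matches(code, guess)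
--     dash= 4 - (b+w)
--     while b > count_b:
--         result += 'b'
--         count_b +=1
--     while w > count_w:
--         result += 'w'
--         count_w +=1
--     while dash > count_dash:
--         result += '-'
--         count_dash +=1
--     return result
-- ===== SOURCE B (Python) =====
-- def compare_codes(code, guess):
--     b = sum(c == g for c, g in zip(code, guess))
--     overlap = sum(min(code.count(ch), guess.count(ch)) for ch in set(code))
--     w = overlap - b
--     return 'b' * b + 'w' * w + '-' * (4 - b - w)
-- ===== Notes on version B (the rewrite author's own statement) =====
-- stated objective: faster
-- what changed: Replaces the helper pair (indexed scan + quadratic greedy list.remove loop) and the three count-up while-loops with a zip count, a per-distinct-character min-count multiset overlap, and direct string repetition.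
import Mathlib
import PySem

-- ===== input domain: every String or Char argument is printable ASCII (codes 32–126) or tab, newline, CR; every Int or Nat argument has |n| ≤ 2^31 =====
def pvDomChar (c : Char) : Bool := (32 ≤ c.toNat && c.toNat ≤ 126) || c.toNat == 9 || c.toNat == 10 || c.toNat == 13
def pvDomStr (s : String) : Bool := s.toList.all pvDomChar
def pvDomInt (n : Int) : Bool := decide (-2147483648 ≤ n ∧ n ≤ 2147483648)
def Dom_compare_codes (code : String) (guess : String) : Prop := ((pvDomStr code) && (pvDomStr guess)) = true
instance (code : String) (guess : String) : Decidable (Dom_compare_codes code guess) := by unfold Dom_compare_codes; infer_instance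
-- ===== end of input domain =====

-- B replaces the two helper scans (indexed loop + greedy list.remove loop) and the three
-- count-up while-loops by a zip count, a per-distinct-character min-count overlap and direct
-- string repetition; same return value wherever A returns (Pre_ excludes only inputs where A
-- raises IndexError).

-- ===== PORT A =====
-- count_exact_matches: for letter in str1: if letter == str2[count]: matches += 1; count += 1
-- (str2[count] is pyGet?; under Pre_ it is always in range)
def pvCEM (s1 s2 : List Char) : Int :=
  (s1.foldl (fun (st : Int × Int) letter =>
    ((if PySem.List.pyGet? s2 st.2 = some letter then st.1 + 1 else st.1), st.2 + 1)) (0, 0)).1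

-- count_letter_matches: if letter in s2: matches += 1; s2.remove(letter)
-- (s2.remove under the membership guard is List.erase, by PySem.List.remove?_eq_some_erase)
def pvCLM (s1 s2 : List Char) : Int :=
  (s1.foldl (fun (st : Int × List Char) letter =>
    if letter ∈ st.2 then (st.1 + 1, st.2.erase letter) else st) (0, s2)).1

-- while target > count: result += c; count += 1
def pvWhileAppend (c : Char) (target count : Int) (acc : List Char) : List Char :=
  if target > count then pvWhileAppend c target (count + 1) (acc ++ [c]) else acc
termination_by (target - count).toNat
decreasing_by omega

def compare_codes (code : String) (guess : String) : String :=
  let b := pvCEM code.toList guess.toList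
  let w := pvCLM code.toList guess.toList - pvCEM code.toList guess.toList
  let dash := 4 - (b + w)
  String.ofList (pvWhileAppend '-' dash 0 (pvWhileAppend 'w' w 0 (pvWhileAppend 'b' b 0 [])))

-- ===== PORT B =====
-- b = sum(c == g for c, g in zip(code, guess))
def pvZipCount (s1 s2 : List Char) : Int :=
  (s1.zip s2).foldl (fun acc p => acc + (if p.1 = p.2 then 1 else 0)) 0

-- overlap = sum(min(code.count(ch), guess.count(ch)) for ch in set(code))
-- (str.count of a single character is exactly the element count of the char list)
def pvOverlap (s1 s2 : List Char) : Int :=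
  ((PySem.Set.ofList s1).map (fun ch => min ((s1.count ch : Int)) ((s2.count ch : Int)))).sum

def compare_codes_alt (code : String) (guess : String) : String :=
  let b := pvZipCount code.toList guess.toList
  let w := pvOverlap code.toList guess.toList - b
  String.ofList (PySem.List.pyRepeat ['b'] b ++ PySem.List.pyRepeat ['w'] w ++
             PySem.List.pyRepeat ['-'] (4 - b - w))

-- ===== PRECONDITION & SPEC =====
-- Pre_ excludes exactly the inputs where A raises: len(code) > len(guess) makes
-- str2[count] in count_exact_matches an IndexError.
def Pre_compare_codes (code : String) (guess : String) : Prop :=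
  code.toList.length ≤ guess.toList.length
instance (code : String) (guess : String) : Decidable (Pre_compare_codes code guess) := by
  unfold Pre_compare_codes; infer_instance

def pvWitness_compare_codes : String × String := ("abcd", "adcb")

def Spec_compare_codes (code : String) (guess : String) (out : String) : Prop :=
  out = compare_codes_alt code guess
instance (code : String) (guess : String) (out : String) : Decidable (Spec_compare_codes code guess out) := by
  unfold Spec_compare_codes; infer_instance

-- ===== CLAIM (what is proved, stated in full; the proofs are below) =====
def Claim_equal_compare_codes : Prop := ∀ (code : String) (guess : String),
  Dom_compare_codes code guess → Pre_compare_codes code guess →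
  Spec_compare_codes code guess (compare_codes code guess)

-- ===== LEMMAS AND PROOFS =====

-- the count-up while loop appends (target - count).toNat copies of c
lemma pvWhileAppend_eq (c : Char) (target : Int) : ∀ (n : Nat) (count : Int) (acc : List Char),
    (target - count).toNat = n →
    pvWhileAppend c target count acc = acc ++ List.replicate n c := by
  intro n
  induction n with
  | zero =>
      intro k acc h
      rw [pvWhileAppend, if_neg (by omega)]
      simp
  | succ m ih =>
      intro k acc h
      rw [pvWhileAppend, if_pos (by omega), ih (k + 1) _ (by omega), List.append_assoc]
      simp [List.replicate_succ]

-- the three result-building while loops start at count = 0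
lemma pvWhileAppend_zero (c : Char) (target : Int) (acc : List Char) :
    pvWhileAppend c target 0 acc = acc ++ List.replicate target.toNat c :=
  pvWhileAppend_eq c target target.toNat 0 acc (by omega)

-- A's indexed exact-match scan equals B's zip count (state generalised over start index)
lemma pvCEM_aux (s2 : List Char) : ∀ (s1 : List Char) (k : Nat) (m : Int),
    k + s1.length ≤ s2.length →
    (s1.foldl (fun (st : Int × Int) letter =>
        ((if PySem.List.pyGet? s2 st.2 = some letter then st.1 + 1 else st.1), st.2 + 1)) (m, (k : Int))).1
      = (s1.zip (s2.drop k)).foldl (fun acc p => acc + (if p.1 = p.2 then 1 else 0)) m := by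
  intro s1
  induction s1 with
  | nil => intro k m _; simp
  | cons h t ih =>
      intro k m hlen
      have hk : k < s2.length := by simp at hlen; omega
      have hdrop : s2.drop k = s2[k] :: s2.drop (k + 1) := List.drop_eq_getElem_cons hk
      have hget : PySem.List.pyGet? s2 (k : Int) = some s2[k] := by
        rw [PySem.List.pyGet?_natCast]; simp [hk]
      simp only [List.foldl_cons, hdrop, List.zip_cons_cons, hget]
      have hcast : (k : Int) + 1 = ((k + 1 : Nat) : Int) := by push_cast; ring
      rw [hcast]
      have hlen' : (k + 1) + t.length ≤ s2.length := by simp at hlen ⊢; omega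
      by_cases hc : s2[k] = h
      · rw [if_pos (by rw [hc]), if_pos hc.symm, ih (k + 1) (m + 1) hlen']
      · rw [if_neg (by simpa using hc), if_neg (fun e => hc e.symm), ih (k + 1) m hlen']
        simp

lemma pvCEM_eq (s1 s2 : List Char) (h : s1.length ≤ s2.length) :
    pvCEM s1 s2 = pvZipCount s1 s2 := by
  unfold pvCEM pvZipCount
  have := pvCEM_aux s2 s1 0 0 (by omega)
  simpa using this

-- the greedy remove loop computes the multiset-intersection size
lemma pvCLM_eq_card : ∀ (s1 s2 : List Char) (m : Int),
    (s1.foldl (fun (st : Int × List Char) letter =>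
        if letter ∈ st.2 then (st.1 + 1, st.2.erase letter) else st) (m, s2)).1
      = m + Multiset.card ((s1 : Multiset Char) ∩ (s2 : Multiset Char)) := by
  intro s1
  induction s1 with
  | nil => intro s2 m; simp
  | cons h t ih =>
      intro s2 m
      simp only [List.foldl_cons]
      by_cases hm : h ∈ s2
      · rw [if_pos hm, ih]
        have hm' : h ∈ (s2 : Multiset Char) := by simpa using hm
        rw [show ((s2.erase h : List Char) : Multiset Char) = (s2 : Multiset Char).erase h from
              (Multiset.coe_erase s2 h).symm]
        rw [show ((h :: t : List Char) : Multiset Char) = h ::ₘ (t : Multiset Char) from rfl]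
        rw [Multiset.cons_inter_of_pos _ hm']
        simp; ring
      · rw [if_neg hm, ih]
        have hm' : h ∉ (s2 : Multiset Char) := by simpa using hm
        rw [show ((h :: t : List Char) : Multiset Char) = h ::ₘ (t : Multiset Char) from rfl]
        rw [Multiset.cons_inter_of_neg _ hm']

-- B's per-distinct-character min-count sum computes the same intersection size
lemma pvOverlap_eq_card (s1 s2 : List Char) :
    pvOverlap s1 s2 = (Multiset.card ((s1 : Multiset Char) ∩ (s2 : Multiset Char)) : Int) := by
  unfold pvOverlap
  have hmin : ∀ ch : Char, min ((s1.count ch : Int)) ((s2.count ch : Int))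
      = (((s1 : Multiset Char) ∩ (s2 : Multiset Char)).count ch : Int) := by
    intro ch
    rw [Multiset.count_inter]
    push_cast
    simp [Multiset.coe_count]
  rw [List.map_congr_left (fun ch _ => hmin ch), ← PySem.List.dedup_eq_ofList,
      ← List.sum_toFinset _ (PySem.List.nodup_dedup s1)]
  have hfin : (PySem.List.dedup s1).toFinset = s1.toFinset := by
    ext a; simp
  rw [hfin]
  have hnat : ∑ a ∈ s1.toFinset, ((s1 : Multiset Char) ∩ (s2 : Multiset Char)).count a
      = Multiset.card ((s1 : Multiset Char) ∩ (s2 : Multiset Char)) := by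
    rw [← Multiset.toFinset_sum_count_eq ((s1 : Multiset Char) ∩ (s2 : Multiset Char))]
    refine (Finset.sum_subset ?_ ?_).symm
    · intro a ha
      have := (Multiset.mem_inter.mp (Multiset.mem_toFinset.mp ha)).1
      simpa using this
    · intro a _ ha
      exact Multiset.count_eq_zero.mpr (fun hc => ha (Multiset.mem_toFinset.mpr hc))
  rw [← hnat]
  push_cast
  rfl

lemma pvCLM_eq (s1 s2 : List Char) : pvCLM s1 s2 = pvOverlap s1 s2 := by
  unfold pvCLM
  rw [pvCLM_eq_card s1 s2 0, pvOverlap_eq_card]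
  ring

-- ===== VERDICT (by name: the statement is the Claim_ definition above) =====
theorem compare_codes_spec : Claim_equal_compare_codes := by
  intro code guess _ hpre
  unfold Spec_compare_codes compare_codes compare_codes_alt
  have hb := pvCEM_eq code.toList guess.toList hpre
  have hw := pvCLM_eq code.toList guess.toList
  simp only [pvWhileAppend_zero, PySem.List.pyRepeat_singleton, hb, hw, List.nil_append]
  have : (4 : Int) - (pvZipCount code.toList guess.toList +
      (pvOverlap code.toList guess.toList - pvZipCount code.toList guess.toList))
      = 4 - pvZipCount code.toList guess.toList -
        (pvOverlap code.toList guess.toList - pvZipCount code.toList guess.toList) := by ring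
  rw [this, List.append_assoc]
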